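-- pv_equiv track=rewrite | github.com/ehdrjs4573/2025_NLP | nlp/star_detector.py | group_star_episodes
-- ===== SOURCE A (Python) =====
-- from typing import List, Tuple
--
-- def group_star_episodes(
--     tagged: List[Tuple[str, str]],
--     min_sentences: int = 1
-- ):
--     """
--     (sentence, label) 리스트를 받아 STAR 에피소드 단위로 묶는다.
--     S가 나오면 새로운 에피소드 시작으로 간주한다.
--     S 없이 T/A/R만 나오는 경우도 하나의 에피소드로 묶어준다.
--     """
--     episodes = []
--     cur_sents = []
--     cur_labels = []
--
--     for sent, label in tagged:
--         # 공백 문장 방어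
--         if not sent.strip():
--             continue
--
--         if label == "S":
--             # 이전 에피소드 저장
--             if cur_sents:
--                 if len(cur_sents) >= min_sentences:
--                     episodes.append(
--                         {"sentences": cur_sents, "labels": cur_labels}
--                     )
--                 cur_sents = []
--                 cur_labels = []
--
--             # 새 에피소드 시작
--             cur_sents.append(sent)
--             cur_labels.append(label)
--         else:
--             # 아직 아무것도 없는데 O만 나오면 스킵
--             if not cur_sents and label == "O":
--                 continue
--             # 그 외(T/A/R/O)는 현재 에피소드에 붙이기
--             cur_sents.append(sent)
--             cur_labels.append(label)
--
--     # 마지막 에피소드 처리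
--     if cur_sents and len(cur_sents) >= min_sentences:
--         episodes.append(
--             {"sentences": cur_sents, "labels": cur_labels}
--         )
--
--     return episodes
-- ===== SOURCE B (Python) =====
-- def group_star_episodes(tagged, min_sentences=1):
--     filtered = [(s, l) for s, l in tagged if s.strip()]
--     i = 0
--     while i < len(filtered) and filtered[i][1] == "O":
--         i += 1
--     rest = filtered[i:]
--     if not rest:
--         return []
--     segs = []
--     cur = [rest[0]]
--     for p in rest[1:]:
--         if p[1] == "S":
--             segs.append(cur)
--             cur = [p]
--         else:
--             cur = cur + [p]
--     segs.append(cur)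
--     return [
--         {"sentences": [s for s, _ in seg], "labels": [l for _, l in seg]}
--         for seg in segs
--         if len(seg) >= min_sentences
--     ]
-- ===== Notes on version B (the rewrite author's own statement) =====
-- stated objective: simpler
-- what changed: Replaces A's single stateful loop (mutating episode/current buffers with save-and-reset logic) by a pipeline: filter blank sentences, drop the leading run of 'O' labels, split the remainder into segments at each 'S', then keep segments of sufficient length.
import Mathlib
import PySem

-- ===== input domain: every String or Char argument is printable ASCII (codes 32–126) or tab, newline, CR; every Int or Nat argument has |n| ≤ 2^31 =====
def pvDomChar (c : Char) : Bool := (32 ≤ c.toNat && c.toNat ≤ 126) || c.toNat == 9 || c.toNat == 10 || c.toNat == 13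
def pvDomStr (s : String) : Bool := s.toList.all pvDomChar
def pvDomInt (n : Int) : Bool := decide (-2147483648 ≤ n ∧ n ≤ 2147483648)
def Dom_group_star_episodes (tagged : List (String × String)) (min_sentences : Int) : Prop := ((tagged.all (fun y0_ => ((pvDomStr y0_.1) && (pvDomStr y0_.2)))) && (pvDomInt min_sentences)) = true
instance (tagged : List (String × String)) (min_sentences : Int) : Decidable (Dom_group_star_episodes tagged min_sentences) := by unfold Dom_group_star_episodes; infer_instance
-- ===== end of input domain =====

-- B: pipeline (filter blanks, drop leading 'O' run, split at 'S', filter by length) instead of A's stateful loop; same order and values.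

-- ===== PORT A =====
def stepA (min_sentences : Int)
    (st : List (List (String × List String)) × List String × List String)
    (p : String × String) :
    List (List (String × List String)) × List String × List String :=
  let (episodes, cur_sents, cur_labels) := st
  if PySem.Str.strip p.1 == "" then st
  else if p.2 == "S" then
    let (episodes', cur_sents', cur_labels') :=
      if cur_sents ≠ [] then
        ((if min_sentences ≤ (cur_sents.length : Int) then
            episodes ++ [[("sentences", cur_sents), ("labels", cur_labels)]]
          else episodes), ([] : List String), ([] : List String))
      else (episodes, cur_sents, cur_labels)
    (episodes', cur_sents' ++ [p.1], cur_labels' ++ [p.2])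
  else if cur_sents = [] ∧ p.2 == "O" then st
  else (episodes, cur_sents ++ [p.1], cur_labels ++ [p.2])

def group_star_episodes (tagged : List (String × String)) (min_sentences : Int) : List (List (String × List String)) :=
  let (episodes, cur_sents, cur_labels) := tagged.foldl (stepA min_sentences) ([], [], [])
  if cur_sents ≠ [] ∧ min_sentences ≤ (cur_sents.length : Int) then
    episodes ++ [[("sentences", cur_sents), ("labels", cur_labels)]]
  else episodes

-- ===== PORT B =====
def segStep (st : List (List (String × String)) × List (String × String)) (p : String × String) :
    List (List (String × String)) × List (String × String) :=
  if p.2 == "S" then (st.1 ++ [st.2], [p]) else (st.1, st.2 ++ [p])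

def segments : List (String × String) → List (List (String × String))
  | [] => []
  | p :: t =>
    let (segs, cur) := t.foldl segStep ([], [p])
    segs ++ [cur]

def group_star_episodes_alt (tagged : List (String × String)) (min_sentences : Int) : List (List (String × List String)) :=
  let filtered := tagged.filter (fun p => !(PySem.Str.strip p.1 == ""))
  let rest := filtered.dropWhile (fun p => p.2 == "O")
  (segments rest).filterMap (fun seg =>
    if min_sentences ≤ (seg.length : Int) then
      some [("sentences", seg.map Prod.fst), ("labels", seg.map Prod.snd)]
    else none)

-- ===== PRECONDITION & SPEC =====
def Spec_group_star_episodes (tagged : List (String × String)) (min_sentences : Int) (out : List (List (String × List String))) : Prop := out = group_star_episodes_alt tagged min_sentences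
instance (tagged : List (String × String)) (min_sentences : Int) (out : List (List (String × List String))) : Decidable (Spec_group_star_episodes tagged min_sentences out) := by unfold Spec_group_star_episodes; infer_instance

-- ===== CLAIM (what is proved, stated in full; the proofs are below) =====
def Claim_equal_group_star_episodes : Prop := ∀ (tagged : List (String × String)) (min_sentences : Int), Dom_group_star_episodes tagged min_sentences → Spec_group_star_episodes tagged min_sentences (group_star_episodes tagged min_sentences)

-- ===== LEMMAS AND PROOFS =====

-- recursion-shaped view of B's segmentation loop, used only by the proofs
def segGo (cur : List (String × String)) : List (String × String) → List (List (String × String))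
  | [] => [cur]
  | p :: t => if p.2 == "S" then cur :: segGo [p] t else segGo (cur ++ [p]) t

theorem foldl_segStep (t : List (String × String)) :
    ∀ (segs : List (List (String × String))) (cur : List (String × String)),
      (t.foldl segStep (segs, cur)).1 ++ [(t.foldl segStep (segs, cur)).2] = segs ++ segGo cur t := by
  induction t with
  | nil => intro segs cur; simp [segGo]
  | cons p t ih =>
    intro segs cur
    by_cases h : (p.2 == "S") = true
    · simp [segStep, h, segGo, ih]
    · simp [segStep, h, segGo, ih]

theorem segments_cons (p : String × String) (t : List (String × String)) :
    segments (p :: t) = segGo [p] t := by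
  simpa [segments] using foldl_segStep t [] [p]

-- emit = B's per-segment filter/projection
def emit (m : Int) (segs : List (List (String × String))) : List (List (String × List String)) :=
  segs.filterMap (fun seg =>
    if m ≤ (seg.length : Int) then
      some [("sentences", seg.map Prod.fst), ("labels", seg.map Prod.snd)]
    else none)

-- A's finalization step
def fin (m : Int) (st : List (List (String × List String)) × List String × List String) : List (List (String × List String)) :=
  if st.2.1 ≠ [] ∧ m ≤ (st.2.1.length : Int) then
    st.1 ++ [[("sentences", st.2.1), ("labels", st.2.2)]]
  else st.1

theorem fin_eq (m : Int) (tagged : List (String × String)) :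
    group_star_episodes tagged m = fin m (tagged.foldl (stepA m) ([], [], [])) := by
  simp [group_star_episodes, fin]

theorem alt_eq (m : Int) (tagged : List (String × String)) :
    group_star_episodes_alt tagged m =
      emit m (segments ((tagged.filter (fun p => !(PySem.Str.strip p.1 == ""))).dropWhile (fun p => p.2 == "O"))) := by
  simp [group_star_episodes_alt, emit]

-- blank entries are no-ops: folding over tagged = folding over the blank-filtered list
theorem foldl_filter_blank (m : Int) (l : List (String × String)) (st : List (List (String × List String)) × List String × List String) :
    l.foldl (stepA m) st = (l.filter (fun p => !(PySem.Str.strip p.1 == ""))).foldl (stepA m) st := by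
  induction l generalizing st with
  | nil => rfl
  | cons p t ih =>
    by_cases h : PySem.Str.strip p.1 == ""
    · simp [h, stepA, ih]
    · simp [h, ih]

-- from the empty state, leading 'O' entries are skipped
theorem foldl_dropWhile_O (m : Int) (l : List (String × String)) :
    l.foldl (stepA m) ([], [], []) = (l.dropWhile (fun p => p.2 == "O")).foldl (stepA m) ([], [], []) := by
  induction l with
  | nil => rfl
  | cons p t ih =>
    by_cases h : (p.2 == "O") = true
    · have hstep : stepA m ([], [], []) p = ([], [], []) := by
        simp only [stepA]
        split_ifs with h1 h2 h3 <;> first | rfl | (exfalso; simp_all)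
      simp only [List.dropWhile_cons, h, if_pos, List.foldl_cons]
      rw [hstep, ih]
    · simp [h]

-- main invariant: with a nonempty current segment q and no blank sentences left,
-- A's loop + finalization equals eps ++ B's segment emission
theorem main_inv (m : Int) (rest : List (String × String))
    (hrest : ∀ p ∈ rest, (PySem.Str.strip p.1 == "") = false)
    (eps : List (List (String × List String))) (q : List (String × String)) (hq : q ≠ []) :
    fin m (rest.foldl (stepA m) (eps, q.map Prod.fst, q.map Prod.snd)) = eps ++ emit m (segGo q rest) := by
  induction rest generalizing eps q with
  | nil =>
    have hq' : q.map Prod.fst ≠ [] := by simpa using hq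
    simp only [List.foldl_nil, fin, segGo, emit, List.filterMap_cons, List.filterMap_nil]
    by_cases hlen : m ≤ (q.length : Int)
    · simp [hq', hlen]
    · simp [hq', hlen]
  | cons p t ih =>
    have hp : (PySem.Str.strip p.1 == "") = false := hrest p (by simp)
    have ht : ∀ r ∈ t, (PySem.Str.strip r.1 == "") = false := fun r hr => hrest r (by simp [hr])
    have hqf : q.map Prod.fst ≠ [] := by simpa using hq
    by_cases hS : (p.2 == "S") = true
    · have hstep : stepA m (eps, q.map Prod.fst, q.map Prod.snd) p =
          ((if m ≤ (q.length : Int) then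
              eps ++ [[("sentences", q.map Prod.fst), ("labels", q.map Prod.snd)]]
            else eps), ([p] : List (String × String)).map Prod.fst, ([p] : List (String × String)).map Prod.snd) := by
        simp [stepA, hp, hS, hqf]
      rw [List.foldl_cons, hstep, ih ht _ [p] (by simp)]
      simp only [segGo, hS, if_pos, emit, List.filterMap_cons]
      by_cases hlen : m ≤ (q.length : Int)
      · simp [hlen]
      · simp [hlen]
    · have hstep : stepA m (eps, q.map Prod.fst, q.map Prod.snd) p =
          (eps, (q ++ [p]).map Prod.fst, (q ++ [p]).map Prod.snd) := by
        simp [stepA, hp, hS, hqf]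
      rw [List.foldl_cons, hstep, ih ht _ (q ++ [p]) (by simp)]
      simp [segGo, hS]

-- from the empty state over a nonblank list, leading 'O' entries are dropped and the
-- first retained entry opens the segment run
theorem startrun (m : Int) (l : List (String × String))
    (hl : ∀ p ∈ l, (PySem.Str.strip p.1 == "") = false) :
    fin m ((l.dropWhile (fun p => p.2 == "O")).foldl (stepA m) ([], [], [])) =
      emit m (segments (l.dropWhile (fun p => p.2 == "O"))) := by
  induction l with
  | nil => simp [fin, segments, emit]
  | cons p t ih =>
    have hp : (PySem.Str.strip p.1 == "") = false := hl p (by simp)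
    have ht : ∀ r ∈ t, (PySem.Str.strip r.1 == "") = false := fun r hr => hl r (by simp [hr])
    by_cases hO : (p.2 == "O") = true
    · simp only [List.dropWhile_cons, hO, if_pos]
      exact ih ht
    · simp only [List.dropWhile_cons, hO, Bool.false_eq_true, if_false]
      have hstep : stepA m ([], [], []) p =
          (([] : List (List (String × List String))), ([p] : List (String × String)).map Prod.fst,
            ([p] : List (String × String)).map Prod.snd) := by
        by_cases hS : (p.2 == "S") = true
        · simp [stepA, hp, hS]
        · simp [stepA, hp, hS, hO]
      rw [List.foldl_cons, hstep, main_inv m t ht [] [p] (by simp), segments_cons]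
      simp

-- ===== VERDICT (by name: the statement is the Claim_ definition above) =====
theorem group_star_episodes_spec : Claim_equal_group_star_episodes := by
  intro tagged m _
  unfold Spec_group_star_episodes
  rw [fin_eq, alt_eq, foldl_filter_blank, foldl_dropWhile_O]
  have hmem : ∀ p ∈ tagged.filter (fun p => !(PySem.Str.strip p.1 == "")), (PySem.Str.strip p.1 == "") = false := by
    intro p hp
    have := List.of_mem_filter hp
    simpa using this
  exact startrun m (tagged.filter (fun p => !(PySem.Str.strip p.1 == ""))) hmem
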